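-- pv_equiv track=rewrite | github.com/rskarbez/advent_of_code | 2021/aoc10b.py | score_fixes
-- ===== SOURCE A (Python) =====
-- def score_fixes(fixes):
--     temp_list = []
--     for fix in fixes:
--         score = 0
--         for c in fix:
--             score *= 5
--             match c:
--                 case ')':
--                     score += 1
--                 case ']':
--                     score += 2
--                 case '}':
--                     score += 3
--                 case '>':
--                     score += 4
--         temp_list.append(score)
--     return temp_list
-- ===== SOURCE B (Python) =====
-- def score_fixes(fixes):
--     value = {')': 1, ']': 2, '}': 3, '>': 4}
--     result = []
--     for fix in fixes:
--         score = 0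
--         power = 1
--         for c in reversed(fix):
--             score += value.get(c, 0) * power
--             power *= 5
--         result.append(score)
--     return result
-- ===== Notes on version B (the rewrite author's own statement) =====
-- stated objective: alternative
-- what changed: Replaces A's left-to-right Horner shift-and-add with a match statement by a right-to-left pass that maintains an explicit positional weight (power of 5) and a dict lookup.
import Mathlib
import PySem

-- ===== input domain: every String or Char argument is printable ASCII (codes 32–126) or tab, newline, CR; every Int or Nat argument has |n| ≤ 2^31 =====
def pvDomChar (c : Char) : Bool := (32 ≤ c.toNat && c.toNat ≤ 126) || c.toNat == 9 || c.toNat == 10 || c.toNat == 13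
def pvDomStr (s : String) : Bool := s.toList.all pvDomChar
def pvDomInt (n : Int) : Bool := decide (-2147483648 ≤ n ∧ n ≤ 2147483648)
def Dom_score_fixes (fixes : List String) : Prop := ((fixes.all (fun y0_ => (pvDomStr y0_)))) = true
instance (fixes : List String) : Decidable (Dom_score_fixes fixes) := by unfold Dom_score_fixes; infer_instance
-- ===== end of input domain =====

-- B replaces A's left-to-right Horner shift-and-add with a right-to-left pass
-- maintaining an explicit positional base-5 weight (objective: alternative decomposition).

-- ===== PORT A =====
-- step of A's inner loop: score *= 5 then the match adds 1..4 for a closer bracket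
def scoreStepA (score : Int) (c : Char) : Int :=
  let score := score * 5
  if c = ')' then score + 1
  else if c = ']' then score + 2
  else if c = '}' then score + 3
  else if c = '>' then score + 4
  else score

def score_fixes (fixes : List String) : List Int :=
  fixes.foldl (fun temp_list fix =>
    temp_list ++ [fix.toList.foldl scoreStepA 0]) []

-- ===== PORT B =====
-- value.get(c, 0) from B's dict
def bracketVal (c : Char) : Int :=
  (PySem.Dict.ofList [(')', (1:Int)), (']', 2), ('}', 3), ('>', 4)]).getD c 0

-- B's inner loop over reversed(fix): state = (score, power)
def scoreStepB (st : Int × Int) (c : Char) : Int × Int :=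
  (st.1 + bracketVal c * st.2, st.2 * 5)

def score_fixes_alt (fixes : List String) : List Int :=
  fixes.map (fun fix => (fix.toList.reverse.foldl scoreStepB (0, 1)).1)

-- ===== PRECONDITION & SPEC =====
def Spec_score_fixes (fixes : List String) (out : List Int) : Prop := out = score_fixes_alt fixes
instance (fixes : List String) (out : List Int) : Decidable (Spec_score_fixes fixes out) := by unfold Spec_score_fixes; infer_instance

-- ===== CLAIM (what is proved, stated in full; the proofs are below) =====
def Claim_equal_score_fixes : Prop := ∀ (fixes : List String), Dom_score_fixes fixes → Spec_score_fixes fixes (score_fixes fixes)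

-- ===== LEMMAS AND PROOFS =====

theorem bracketVal_eq (c : Char) :
    bracketVal c = (if c = ')' then 1 else if c = ']' then 2 else if c = '}' then 3
      else if c = '>' then 4 else 0) := by
  by_cases h1 : c = ')'
  · subst h1; decide
  by_cases h2 : c = ']'
  · subst h2; decide
  by_cases h3 : c = '}'
  · subst h3; decide
  by_cases h4 : c = '>'
  · subst h4; decide
  have e1 : (')' == c) = false := beq_eq_false_iff_ne.mpr (Ne.symm h1)
  have e2 : (']' == c) = false := beq_eq_false_iff_ne.mpr (Ne.symm h2)
  have e3 : ('}' == c) = false := beq_eq_false_iff_ne.mpr (Ne.symm h3)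
  have e4 : ('>' == c) = false := beq_eq_false_iff_ne.mpr (Ne.symm h4)
  simp [bracketVal, PySem.Dict.ofList, PySem.Dict.getD, PySem.Dict.get?, PySem.Dict.update,
    PySem.Dict.insert, PySem.Dict.empty, List.find?, e1, e2, e3, e4, h1, h2, h3, h4]

theorem scoreStepA_eq (s : Int) (c : Char) : scoreStepA s c = s * 5 + bracketVal c := by
  rw [bracketVal_eq]; simp [scoreStepA]; split_ifs <;> ring

-- B's fold over m accumulates s + p * (Horner value of m.reverse)
theorem foldB_eq (m : List Char) : ∀ (s p : Int),
    (m.foldl scoreStepB (s, p)).1 = s + p * (m.reverse.foldl scoreStepA 0) := by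
  induction m with
  | nil => intro s p; simp
  | cons c m ih =>
      intro s p
      simp only [List.foldl_cons, scoreStepB, List.reverse_cons, List.foldl_append,
        List.foldl_cons, List.foldl_nil, ih]
      rw [scoreStepA_eq]
      ring

theorem inner_eq (l : List Char) :
    l.foldl scoreStepA 0 = (l.reverse.foldl scoreStepB (0, 1)).1 := by
  rw [foldB_eq]; simp

theorem score_fixes_eq_map (fixes : List String) :
    score_fixes fixes = fixes.map (fun fix => fix.toList.foldl scoreStepA 0) := by
  unfold score_fixes
  induction fixes using List.reverseRecOn with
  | nil => simp
  | append_singleton xs x ih => simp [ih]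

-- ===== VERDICT (by name: the statement is the Claim_ definition above) =====
theorem score_fixes_spec : Claim_equal_score_fixes := by
  intro fixes _
  unfold Spec_score_fixes score_fixes_alt
  rw [score_fixes_eq_map]
  exact List.map_congr_left (fun fix _ => inner_eq _)
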